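-- pv_equiv track=rewrite | github.com/xuemzhan/gecko | scripts/waterprint.py | _normalize_for_signature
-- ===== SOURCE A (Python) =====
-- def _normalize_for_signature(content: str) -> str:
--     """
--     为签名计算做内容规范化：
--     - 去除每行末尾多余空白
--     - 折叠连续空行为单个空行
--     - 去掉文件末尾多余空行
--     - 统一以 '\n' 结尾
--
--     这样即使加/删水印或编辑时空行略有变化，签名仍可稳定一致。
--     """
--     lines = content.splitlines()
--     normalized = []
--     last_blank = False
--
--     for line in lines:
--         if line.strip() == "":
--             # 连续空行折叠为1行
--             if not last_blank:
--                 normalized.append("")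
--                 last_blank = True
--         else:
--             normalized.append(line.rstrip())
--             last_blank = False
--
--     # 去掉末尾多余空行
--     while normalized and normalized[-1] == "":
--         normalized.pop()
--
--     # 统一加一个结尾换行，保证稳定
--     return "\n".join(normalized) + "\n"
-- ===== SOURCE B (Python) =====
-- def _normalize_for_signature(content: str) -> str:
--     stripped = [line.rstrip() for line in content.splitlines()]
--     # keep a line unless it is blank and the next line is blank too:
--     # this keeps exactly the last blank of every blank run (same single "")
--     kept = [cur for cur, nxt in zip(stripped, stripped[1:]) if cur != "" or nxt != ""]
--     kept += stripped[-1:]  # the final line always survives run-collapsing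
--     # run-collapsing leaves at most one trailing blank entry; drop it
--     if kept and kept[-1] == "":
--         kept.pop()
--     return "\n".join(kept) + "\n"
-- ===== Notes on version B (the rewrite author's own statement) =====
-- stated objective: alternative
-- what changed: B drops A's stateful last_blank flag loop and trailing-pop loop: it rstrips all lines, collapses blank runs with a zip-with-next comprehension that keeps the last blank of each run, and pops at most one trailing blank (run-collapsing guarantees there is at most one).
import Mathlib
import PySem

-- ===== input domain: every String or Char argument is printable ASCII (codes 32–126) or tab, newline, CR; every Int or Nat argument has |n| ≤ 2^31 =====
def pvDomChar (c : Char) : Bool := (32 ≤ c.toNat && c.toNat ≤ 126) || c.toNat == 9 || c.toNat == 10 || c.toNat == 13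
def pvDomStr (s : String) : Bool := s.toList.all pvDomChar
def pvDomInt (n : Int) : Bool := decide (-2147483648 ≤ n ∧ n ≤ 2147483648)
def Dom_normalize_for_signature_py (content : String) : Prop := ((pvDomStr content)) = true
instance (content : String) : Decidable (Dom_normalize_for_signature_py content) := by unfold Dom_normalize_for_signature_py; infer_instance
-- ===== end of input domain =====

-- B replaces A's stateful last_blank loop by a zip-with-next comprehension that keeps the
-- last blank of each blank run (same value; 'alternative' decomposition, no speed claim).

-- ===== PORT A =====
-- port of: while normalized and normalized[-1] == "": normalized.pop()
def pvTrimA (l : List String) : List String :=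
  if l.getLast? = some "" then pvTrimA l.dropLast else l
termination_by l.length
decreasing_by
  rename_i h
  have hne : l ≠ [] := by intro e; subst e; simp at h
  have := List.length_pos_of_ne_nil hne
  simp [List.length_dropLast]; omega

def normalize_for_signature_py (content : String) : String :=
  -- lines = content.splitlines(); for line in lines: … (state = (normalized, last_blank));
  -- then the trailing-blank pop loop (pvTrimA), then "\n".join(normalized) + "\n"
  PySem.Str.join "\n"
    (pvTrimA
      (((PySem.Str.splitlines content).foldl
        (fun (st : List String × Bool) line =>
          if PySem.Str.strip line = "" then
            if !st.2 then (st.1 ++ [""], true) else (st.1, true)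
          else (st.1 ++ [PySem.Str.rstrip line], false))
        ([], false)).1)) ++ "\n"

-- ===== PORT B =====
-- stripped = [line.rstrip() for line in content.splitlines()]
def pvStripped (content : String) : List String :=
  (PySem.Str.splitlines content).map PySem.Str.rstrip

-- kept = [cur for cur, nxt in zip(stripped, stripped[1:]) if cur != "" or nxt != ""] + stripped[-1:]
def pvKept (content : String) : List String :=
  (((pvStripped content).zip (PySem.List.slice (pvStripped content) (some 1) none)).filter
      (fun p : String × String => p.1 != "" || p.2 != "")).map Prod.fst
    ++ PySem.List.slice (pvStripped content) (some (-1)) none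

def normalize_for_signature_py_alt (content : String) : String :=
  -- if kept and kept[-1] == "": kept.pop(); return "\n".join(kept) + "\n"
  PySem.Str.join "\n"
    (if (pvKept content).getLast? = some "" then (pvKept content).dropLast else pvKept content)
    ++ "\n"

-- ===== PRECONDITION & SPEC =====
def Spec_normalize_for_signature_py (content : String) (out : String) : Prop := out = normalize_for_signature_py_alt content
instance (content : String) (out : String) : Decidable (Spec_normalize_for_signature_py content out) := by unfold Spec_normalize_for_signature_py; infer_instance

-- ===== CLAIM (what is proved, stated in full; the proofs are below) =====
def Claim_equal_normalize_for_signature_py : Prop := ∀ (content : String), Dom_normalize_for_signature_py content → Spec_normalize_for_signature_py content (normalize_for_signature_py content)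

-- ===== LEMMAS AND PROOFS =====

-- proof-side model of run-collapsing: keep a line unless it and the next are both blank
def pvCollapse : List String → List String
  | [] => []
  | [x] => [x]
  | x :: y :: r => if x = "" ∧ y = "" then pvCollapse (y :: r) else x :: pvCollapse (y :: r)

def pvDropLead (l : List String) : List String := if l.head? = some "" then l.tail else l

-- proof-side model of A's for-loop output (b = last_blank flag)
def pvALoop : List String → Bool → List String
  | [], _ => []
  | x :: xs, b =>
    if PySem.Str.strip x = "" then
      if b then pvALoop xs true else "" :: pvALoop xs true
    else PySem.Str.rstrip x :: pvALoop xs false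

lemma pvCollapse_bb (t : List String) : pvCollapse ("" :: "" :: t) = pvCollapse ("" :: t) := by
  simp [pvCollapse]

lemma pvCollapse_cc (x y : String) (t : List String) (h : ¬(x = "" ∧ y = "")) :
    pvCollapse (x :: y :: t) = x :: pvCollapse (y :: t) := by
  simp [pvCollapse, h]

lemma pvCollapse_cons_ne (a : String) (t : List String) (h : a ≠ "") :
    pvCollapse (a :: t) = a :: pvCollapse t := by
  cases t with
  | nil => simp [pvCollapse]
  | cons b t' => exact pvCollapse_cc a b t' (by simp [h])

lemma pvALoop_blank_false (x : String) (xs : List String) (hs : PySem.Str.strip x = "") :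
    pvALoop (x :: xs) false = "" :: pvALoop xs true := by
  simp [pvALoop, hs]

lemma pvALoop_blank_true (x : String) (xs : List String) (hs : PySem.Str.strip x = "") :
    pvALoop (x :: xs) true = pvALoop xs true := by
  simp [pvALoop, hs]

lemma pvALoop_nonblank (x : String) (xs : List String) (hs : ¬ PySem.Str.strip x = "") (b : Bool) :
    pvALoop (x :: xs) b = PySem.Str.rstrip x :: pvALoop xs false := by
  simp [pvALoop, hs]

lemma chars_rstrip_eq_nil_iff (l : List Char) :
    PySem.Chars.rstrip l = [] ↔ ∀ c ∈ l, PySem.Chars.isspace c = true := by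
  simp [PySem.Chars.rstrip, List.dropWhile_eq_nil_iff]

lemma strip_eq_empty_iff (x : String) :
    (PySem.Str.strip x = "") ↔ (PySem.Str.rstrip x = "") := by
  rw [← String.toList_eq_nil_iff (b := PySem.Str.strip x),
      ← String.toList_eq_nil_iff (b := PySem.Str.rstrip x),
      PySem.Str.toList_strip, PySem.Str.toList_rstrip]
  rw [PySem.Chars.strip, chars_rstrip_eq_nil_iff, chars_rstrip_eq_nil_iff]
  constructor
  · intro h c hc
    rcases List.mem_append.1 (by
        rw [List.takeWhile_append_dropWhile (p := PySem.Chars.isspace) (l := x.toList)]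
        exact hc) with h1 | h2
    · exact List.mem_takeWhile_imp h1
    · exact h c h2
  · intro h c hc
    exact h c ((List.dropWhile_sublist _).subset hc)

lemma head?_pvCollapse_blank : ∀ r, (pvCollapse ("" :: r)).head? = some "" := by
  intro r
  induction r with
  | nil => simp [pvCollapse]
  | cons z r' ih =>
    by_cases hz : z = ""
    · subst hz; rw [pvCollapse_bb]; exact ih
    · rw [pvCollapse_cc _ _ _ (by simp [hz])]; simp

lemma head?_pvCollapse_ne (y : String) (hy : y ≠ "") (r : List String) :
    (pvCollapse (y :: r)).head? = some y := by
  rw [pvCollapse_cons_ne _ _ hy]; simp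

lemma pvCollapse_ne_nil (y : String) (r : List String) : pvCollapse (y :: r) ≠ [] := by
  by_cases hy : y = ""
  · subst hy; intro e; have := head?_pvCollapse_blank r; rw [e] at this; simp at this
  · intro e; have := head?_pvCollapse_ne y hy r; rw [e] at this; simp at this

lemma pvDropLead_blank_head (t : List String) :
    "" :: pvDropLead (pvCollapse ("" :: t)) = pvCollapse ("" :: t) := by
  rcases hC : pvCollapse ("" :: t) with _ | ⟨c0, c'⟩
  · exact absurd hC (pvCollapse_ne_nil "" t)
  · have hc0 : c0 = "" := by
      have := head?_pvCollapse_blank t; rw [hC] at this; simpa using this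
    subst hc0
    rw [pvDropLead]; simp

lemma pvDropLead_ne_head (y : String) (hy : y ≠ "") (r : List String) :
    pvDropLead (pvCollapse (y :: r)) = pvCollapse (y :: r) := by
  rw [pvDropLead, head?_pvCollapse_ne y hy r, if_neg (by simp [hy])]

lemma pvALoop_eq : ∀ xs : List String,
    pvALoop xs false = pvCollapse (xs.map PySem.Str.rstrip) ∧
    pvALoop xs true = pvDropLead (pvCollapse (xs.map PySem.Str.rstrip)) := by
  intro xs
  induction xs with
  | nil => simp [pvALoop, pvCollapse, pvDropLead]
  | cons x xs ih =>
    obtain ⟨ih1, ih2⟩ := ih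
    rw [List.map_cons]
    by_cases hb : PySem.Str.rstrip x = ""
    · have hs : PySem.Str.strip x = "" := (strip_eq_empty_iff x).2 hb
      rw [hb, pvALoop_blank_false x xs hs, pvALoop_blank_true x xs hs, ih2]
      rcases hT : (xs.map PySem.Str.rstrip) with _ | ⟨h0, t'⟩
      · constructor
        · simp [pvCollapse, pvDropLead]
        · simp [pvCollapse, pvDropLead]
      · by_cases hh : h0 = ""
        · subst hh
          rw [pvCollapse_bb]
          exact ⟨pvDropLead_blank_head t', rfl⟩
        · rw [pvCollapse_cc _ _ _ (by simp [hh]), pvDropLead_ne_head h0 hh t']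
        -- wait: structure differs; handled below
          constructor
          · rfl
          · rw [pvDropLead]; simp
    · have hs : ¬ PySem.Str.strip x = "" := fun h => hb ((strip_eq_empty_iff x).1 h)
      rw [pvALoop_nonblank x xs hs false, pvALoop_nonblank x xs hs true, ih1,
          pvCollapse_cons_ne _ _ hb]
      constructor
      · rfl
      · rw [pvDropLead]; simp [hb]

lemma pvCollapse_no_double : ∀ s : List String,
    (pvCollapse s).getLast? = some "" → (pvCollapse s).dropLast.getLast? ≠ some "" := by
  intro s
  induction s using pvCollapse.induct with
  | case1 => simp [pvCollapse]
  | case2 x => simp [pvCollapse]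
  | case3 x y r hxy ih =>
    obtain ⟨hx, hy⟩ := hxy
    subst hx; subst hy
    rw [pvCollapse_bb]; exact ih
  | case4 x y r hxy ih =>
    rw [pvCollapse_cc _ _ _ hxy]
    rcases hC : pvCollapse (y :: r) with _ | ⟨c0, c''⟩
    · exact absurd hC (pvCollapse_ne_nil y r)
    · intro hlast
      rw [List.getLast?_cons_cons] at hlast
      rcases hD : (c0 :: c'').dropLast with _ | ⟨d0, d'⟩
      · -- c'' = [], so pvCollapse (y :: r) = [""]
        have hc'' : c'' = [] := by cases c'' with | nil => rfl | cons a b => simp at hD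
        subst hc''
        have hc0 : c0 = "" := by simpa using hlast
        subst hc0
        have hy : y = "" := by
          by_contra hy
          have := head?_pvCollapse_ne y hy r
          rw [hC] at this; simp at this; exact hy this
        have hx : x ≠ "" := fun hx => hxy ⟨hx, hy⟩
        simp [hx]
      · have := ih (by rw [hC]; exact hlast)
        rw [hC, hD] at this
        have hdl : (x :: c0 :: c'').dropLast = x :: (c0 :: c'').dropLast := by
          simp [List.dropLast_cons₂]
        rw [hdl, hD, List.getLast?_cons_cons]
        exact this

lemma pvTrimA_of_ne (l : List String) (h : l.getLast? ≠ some "") : pvTrimA l = l := by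
  rw [pvTrimA, if_neg h]

lemma pvTrimA_pvCollapse (s : List String) :
    pvTrimA (pvCollapse s) =
      if (pvCollapse s).getLast? = some "" then (pvCollapse s).dropLast else pvCollapse s := by
  by_cases h : (pvCollapse s).getLast? = some ""
  · rw [pvTrimA, if_pos h, if_pos h]
    exact pvTrimA_of_ne _ (pvCollapse_no_double s h)
  · rw [pvTrimA_of_ne _ h, if_neg h]

lemma foldl_step (xs : List String) : ∀ (st : List String × Bool),
    (xs.foldl
      (fun (st : List String × Bool) line =>
        if PySem.Str.strip line = "" then
          if !st.2 then (st.1 ++ [""], true) else (st.1, true)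
        else (st.1 ++ [PySem.Str.rstrip line], false))
      st).1 = st.1 ++ pvALoop xs st.2 := by
  induction xs with
  | nil => intro st; simp [pvALoop]
  | cons x xs ih =>
    intro st
    rw [List.foldl_cons, ih]
    obtain ⟨a, b⟩ := st
    by_cases hs : PySem.Str.strip x = ""
    · cases b with
      | false => rw [pvALoop_blank_false x xs hs]; simp [hs]
      | true => rw [pvALoop_blank_true x xs hs]; simp [hs]
    · rw [pvALoop_nonblank x xs hs b]; simp [hs]

lemma slice_last (xs : List String) :
    PySem.List.slice xs (some (-1)) none = xs.drop (xs.length - 1) := by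
  cases xs with
  | nil => simp [PySem.List.slice, PySem.List.clampIdx]
  | cons a t =>
    simp only [PySem.List.slice, PySem.List.clampIdx]
    have hlen : 1 ≤ (a :: t).length := by simp
    have h1 : ¬ ((a :: t).length : Int) + (-1) < 0 := by omega
    rw [if_pos (by norm_num), if_neg h1]
    have h2 : (((a :: t).length : Int) + (-1)).toNat = (a :: t).length - 1 := by omega
    rw [h2]
    have h3 : (a :: t).length - ((a :: t).length - 1) = 1 := by omega
    rw [h3]
    apply List.take_of_length_le
    simp only [List.length_drop]
    omega

lemma zipfilter_eq (s : List String) :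
    ((s.zip (s.drop 1)).filter (fun p : String × String => p.1 != "" || p.2 != "")).map Prod.fst
      ++ s.drop (s.length - 1) = pvCollapse s := by
  induction s using pvCollapse.induct with
  | case1 => simp [pvCollapse]
  | case2 x => simp [pvCollapse]
  | case3 x y r hxy ih =>
    obtain ⟨hx, hy⟩ := hxy
    subst hx; subst hy
    rw [pvCollapse_bb, ← ih]
    have hz : ("" :: "" :: r).zip (("" :: "" :: r).drop 1)
        = ("", "") :: (("" :: r).zip (("" :: r).drop 1)) := by
      cases r <;> simp
    rw [hz, List.filter_cons]
    simp
  | case4 x y r hxy ih =>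
    rw [pvCollapse_cc _ _ _ hxy, ← ih]
    have hz : (x :: y :: r).zip ((x :: y :: r).drop 1)
        = (x, y) :: ((y :: r).zip ((y :: r).drop 1)) := by
      cases r <;> simp
    rw [hz, List.filter_cons]
    have hc : ((x, y).1 != "" || (x, y).2 != "") = true := by
      by_cases hx : x = ""
      · subst hx
        have hy : y ≠ "" := by intro e; exact hxy ⟨rfl, e⟩
        simp [hy]
      · simp [hx]
    rw [if_pos hc]
    simp

-- ===== VERDICT (by name: the statement is the Claim_ definition above) =====
theorem normalize_for_signature_py_spec : Claim_equal_normalize_for_signature_py := by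
  intro content _
  show normalize_for_signature_py content = normalize_for_signature_py_alt content
  unfold normalize_for_signature_py normalize_for_signature_py_alt pvKept pvStripped
  rw [foldl_step]
  simp only [List.nil_append]
  rw [(pvALoop_eq (PySem.Str.splitlines content)).1,
      pvTrimA_pvCollapse,
      PySem.List.slice_from _ (by norm_num : (0:Int) ≤ 1), slice_last]
  rw [show ((1:Int).toNat) = 1 from rfl, zipfilter_eq]
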